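-- pv_equiv track=rewrite | github.com/hlocuwu/Python_exercises | Contest2/Bai19.py | solve
-- ===== SOURCE A (Python) =====
-- def solve(n):
--     price = 28 #168
--     bia = n // price # 6
--     vo = bia # 6
--
--     while vo >= 3:
--         new = vo // 3 # 2
--         bia += new # 8
--         vo -= new * 3
--
--     return bia
-- ===== SOURCE B (Python) =====
-- def solve(n):
--     # Direct arithmetic on n: bottles bought plus one exchange round,
--     # using (n//28)//3 == n//84 and the threshold n >= 84 (i.e. n//28 >= 3).
--     return n // 28 + (n // 84 if n >= 84 else 0)
-- ===== Notes on version B (the rewrite author's own statement) =====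
-- stated objective: simpler
-- what changed: Replaced A's while loop and its bia/vo state with a single arithmetic expression on n itself, n//28 + n//84 past the exchange threshold n >= 84, using the nested floor-division identity (n//28)//3 = n//84.
import Mathlib
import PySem

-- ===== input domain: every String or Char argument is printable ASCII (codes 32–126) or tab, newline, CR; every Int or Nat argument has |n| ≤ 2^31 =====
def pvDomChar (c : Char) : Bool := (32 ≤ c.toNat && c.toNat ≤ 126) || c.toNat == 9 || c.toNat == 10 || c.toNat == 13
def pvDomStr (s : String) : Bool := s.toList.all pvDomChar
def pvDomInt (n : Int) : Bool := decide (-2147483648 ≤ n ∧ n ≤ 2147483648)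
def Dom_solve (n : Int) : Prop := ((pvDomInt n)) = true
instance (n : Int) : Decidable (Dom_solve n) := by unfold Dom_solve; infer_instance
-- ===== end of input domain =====

-- ===== PORT A =====
-- B replaces A's cap-exchange loop and its bia/vo state with one arithmetic
-- expression on n (n//28 + n//84 past the threshold n >= 84); objective: simpler.
-- the while loop of A, step for step
def solveLoop (bia vo : Int) : Int :=
  if h : 3 ≤ vo then
    let nw := PySem.Int.floordiv vo 3
    solveLoop (bia + nw) (vo - nw * 3)
  else bia
termination_by vo.toNat
decreasing_by
  have h3 : (0:Int) < 3 := by norm_num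
  have := PySem.Int.floordiv_eq_ediv_of_pos (a := vo) h3
  simp only [this]
  have h2 : 0 ≤ vo % 3 := Int.emod_nonneg vo (by norm_num)
  have h4 : vo % 3 < 3 := Int.emod_lt_of_pos vo h3
  have h1 : 3 * (vo / 3) + vo % 3 = vo := Int.ediv_add_emod vo 3
  omega

def solve (n : Int) : Int :=
  let bia := PySem.Int.floordiv n 28
  solveLoop bia bia

-- ===== PORT B =====
def solve_alt (n : Int) : Int :=
  PySem.Int.floordiv n 28 + (if 84 ≤ n then PySem.Int.floordiv n 84 else 0)

-- ===== PRECONDITION & SPEC =====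
def Spec_solve (n : Int) (out : Int) : Prop := out = solve_alt n
instance (n : Int) (out : Int) : Decidable (Spec_solve n out) := by unfold Spec_solve; infer_instance

-- ===== CLAIM (what is proved, stated in full; the proofs are below) =====
def Claim_equal_solve : Prop := ∀ (n : Int), Dom_solve n → Spec_solve n (solve n)

-- ===== LEMMAS AND PROOFS =====
theorem solveLoop_eq (bia vo : Int) :
    solveLoop bia vo = if 3 ≤ vo then bia + PySem.Int.floordiv vo 3 else bia := by
  rw [solveLoop]
  split_ifs with h
  · have h3 : (0:Int) < 3 := by norm_num
    have hfd : PySem.Int.floordiv vo 3 = vo / 3 := PySem.Int.floordiv_eq_ediv_of_pos h3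
    rw [solveLoop]
    have h2 : 0 ≤ vo % 3 := Int.emod_nonneg vo (by norm_num)
    have h4 : vo % 3 < 3 := Int.emod_lt_of_pos vo h3
    have hstop : ¬ 3 ≤ vo - PySem.Int.floordiv vo 3 * 3 := by
      rw [hfd]; omega
    rw [dif_neg hstop]
  · rfl

theorem solve_spec : Claim_equal_solve := by
  intro n _
  unfold Spec_solve solve solve_alt
  simp only [solveLoop_eq]
  have h28 : PySem.Int.floordiv n 28 = n / 28 :=
    PySem.Int.floordiv_eq_ediv_of_pos (by norm_num)
  have h84 : PySem.Int.floordiv n 84 = n / 84 :=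
    PySem.Int.floordiv_eq_ediv_of_pos (by norm_num)
  have h3 : PySem.Int.floordiv (n / 28) 3 = (n / 28) / 3 :=
    PySem.Int.floordiv_eq_ediv_of_pos (by norm_num)
  have hnest : n / 28 / 3 = n / 84 := by
    have := Int.ediv_ediv_of_nonneg (x := n) (z := 3) (by norm_num : (0:Int) ≤ 28)
    simpa using this
  have hguard : (3 ≤ n / 28) ↔ 84 ≤ n := by
    rw [Int.le_ediv_iff_mul_le (by norm_num : (0:Int) < 28)]; omega
  rw [h28, h3, hnest]
  split_ifs with h1 h2 h2
  · ring_nf; rw [h84]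
  · exact absurd (hguard.mp h1) h2
  · exact absurd (hguard.mpr h2) h1
  · ring

-- ===== VERDICT (by name: the statement is the Claim_ definition above) =====
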